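-- pv_equiv track=rewrite | github.com/ML4GLand/SeqExplainer | seqexplainer/_seq.py | _collapse_pos
-- ===== SOURCE A (Python) =====
-- def _collapse_pos(positions):
--     """Collapse neighbor positions of array to ranges"""
--     ranges = []
--     start = positions[0]
--     for i in range(1, len(positions)):
--         if positions[i - 1] == positions[i] - 1:
--             continue
--         else:
--             ranges.append((start, positions[i - 1] + 2))
--             start = positions[i]
--     ranges.append((start, positions[-1] + 2))
--     return ranges
-- ===== SOURCE B (Python) =====
-- def _collapse_pos(positions):
--     """Collapse neighbor positions of array to ranges"""
--     n = len(positions)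
--     breaks = [i for i in range(1, n) if positions[i] != positions[i - 1] + 1]
--     bounds = [0] + breaks + [n]
--     return [(positions[s], positions[e - 1] + 2) for s, e in zip(bounds, bounds[1:])]
-- ===== Notes on version B (the rewrite author's own statement) =====
-- stated objective: alternative
-- what changed: B replaces A's running-start stateful loop by a two-pass decomposition: first collect the break indices where consecutivity fails, then map each adjacent pair of boundaries to a range.
import Mathlib
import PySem

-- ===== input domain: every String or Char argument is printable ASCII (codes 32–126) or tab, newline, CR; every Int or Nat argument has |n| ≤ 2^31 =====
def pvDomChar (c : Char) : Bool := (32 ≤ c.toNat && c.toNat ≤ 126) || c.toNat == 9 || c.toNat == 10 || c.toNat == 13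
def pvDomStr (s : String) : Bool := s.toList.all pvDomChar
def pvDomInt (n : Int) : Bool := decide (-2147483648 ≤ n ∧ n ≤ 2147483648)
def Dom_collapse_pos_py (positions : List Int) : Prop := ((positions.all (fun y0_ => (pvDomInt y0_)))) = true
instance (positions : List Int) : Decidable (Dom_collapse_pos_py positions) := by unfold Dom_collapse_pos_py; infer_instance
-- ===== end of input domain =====

-- B collapses consecutive positions to ranges by a two-pass break-index decomposition instead of A's running-start loop (same cost, different structure).

-- ===== PORT A =====
-- the body of A's for-loop, on state (ranges, start)
def aStep (l : List Int) (st : List (Int × Int) × Int) (i : Int) : List (Int × Int) × Int :=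
  if PySem.List.pyGetD l (i - 1) 0 = PySem.List.pyGetD l i 0 - 1 then st
  else (st.1 ++ [(st.2, PySem.List.pyGetD l (i - 1) 0 + 2)], PySem.List.pyGetD l i 0)

def collapse_pos_py (positions : List Int) : List (Int × Int) :=
  match PySem.List.pyGet? positions 0 with
  | none => []  -- Python raises IndexError on the empty list; excluded by Pre_
  | some p0 =>
    -- indices i-1, i inside the loop are always in range, so pyGetD is exact there
    let res := (PySem.List.pyRange 1 positions.length 1).foldl (aStep positions) ([], p0)
    res.1 ++ [(res.2, PySem.List.pyGetD positions (-1) 0 + 2)]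

-- ===== PORT B =====
-- [(positions[s], positions[e-1] + 2) for ...]: both indices are always in range, so pyGetD is exact
def altPair (l : List Int) (se : Int × Int) : Int × Int :=
  (PySem.List.pyGetD l se.1 0, PySem.List.pyGetD l (se.2 - 1) 0 + 2)

def collapse_pos_py_alt (positions : List Int) : List (Int × Int) :=
  let n : Int := positions.length
  let breaks := (PySem.List.pyRange 1 n 1).filter
      (fun i => PySem.List.pyGetD positions i 0 != PySem.List.pyGetD positions (i - 1) 0 + 1)
  let bounds := 0 :: (breaks ++ [n])
  -- bounds[1:] is bounds.drop 1 (exact: nonnegative slice start on a list)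
  (bounds.zip (bounds.drop 1)).map (altPair positions)

-- ===== PRECONDITION & SPEC =====
-- Pre_ excludes only the empty list, on which A (positions[0]) raises IndexError.
def Pre_collapse_pos_py (positions : List Int) : Prop := positions ≠ []
instance (positions : List Int) : Decidable (Pre_collapse_pos_py positions) := by unfold Pre_collapse_pos_py; infer_instance
def pvWitness_collapse_pos_py : List Int := ([1, 2, 3, 7, 9])

def Spec_collapse_pos_py (positions : List Int) (out : List (Int × Int)) : Prop := out = collapse_pos_py_alt positions
instance (positions : List Int) (out : List (Int × Int)) : Decidable (Spec_collapse_pos_py positions out) := by unfold Spec_collapse_pos_py; infer_instance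

-- ===== CLAIM (what is proved, stated in full; the proofs are below) =====
def Claim_equal_collapse_pos_py : Prop := ∀ (positions : List Int), Dom_collapse_pos_py positions → Pre_collapse_pos_py positions → Spec_collapse_pos_py positions (collapse_pos_py positions)

-- ===== LEMMAS AND PROOFS =====

-- B's output, seen as a chain walk over the boundary list (proof-only helper)
def chainB (l : List Int) : Int → List Int → List (Int × Int)
  | _, [] => []
  | s, e :: bs => (PySem.List.pyGetD l s 0, PySem.List.pyGetD l (e - 1) 0 + 2) :: chainB l e bs

-- like chainB, but the first range starts at a carried VALUE (A's `start`) instead of an index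
def tailA (l : List Int) : Int → List Int → List (Int × Int)
  | _, [] => []
  | start, e :: bs => (start, PySem.List.pyGetD l (e - 1) 0 + 2) :: chainB l e bs

lemma chainB_eq_tailA (l : List Int) (s : Int) (bs : List Int) :
    chainB l s bs = tailA l (PySem.List.pyGetD l s 0) bs := by
  cases bs <;> simp [chainB, tailA]

lemma zip_map_chainB (l : List Int) : ∀ (bs : List Int) (s : Int),
    (((s :: bs).zip bs).map (altPair l)) = chainB l s bs := by
  intro bs
  induction bs with
  | nil => intro s; simp [chainB]
  | cons e rest ih => intro s; simp [chainB, altPair, ih e]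

lemma pyGetD_last (l : List Int) (h : l ≠ []) :
    PySem.List.pyGetD l (-1) 0 = PySem.List.pyGetD l ((l.length : Int) - 1) 0 := by
  have h1 : 0 < l.length := List.length_pos_iff.mpr h
  have h2 : ((l.length : Int) - 1) = ((l.length - 1 : Nat) : Int) := by omega
  rw [PySem.List.pyGetD_neg_one l 0 h, h2, PySem.List.pyGetD_natCast]
  rw [List.getLast_eq_getElem, List.getD_eq_getElem l 0 (by omega)]

-- main invariant: A's loop from index k, packaged with its final append, equals
-- `ranges` followed by the chain walk over the break indices ≥ k (plus the final bound n)
lemma fold_eq (l : List Int) : ∀ (m : Nat) (k : Int), 1 ≤ k → k + m = l.length →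
    ∀ (ranges : List (Int × Int)) (start : Int),
    (((PySem.List.pyRange k l.length 1).foldl (aStep l) (ranges, start)).1
      ++ [(((PySem.List.pyRange k l.length 1).foldl (aStep l) (ranges, start)).2,
           PySem.List.pyGetD l ((l.length : Int) - 1) 0 + 2)])
    = ranges ++ tailA l start
        (((PySem.List.pyRange k l.length 1).filter
            (fun i => PySem.List.pyGetD l i 0 != PySem.List.pyGetD l (i - 1) 0 + 1)) ++ [(l.length : Int)]) := by
  intro m
  induction m with
  | zero =>
    intro k hk hkm ranges start
    have hnil : PySem.List.pyRange k l.length 1 = [] :=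
      PySem.List.pyRange_one_eq_nil (by omega)
    simp [hnil, tailA, chainB]
  | succ m ih =>
    intro k hk hkm ranges start
    have hlt : k < (l.length : Int) := by omega
    rw [PySem.List.pyRange_one_cons hlt]
    by_cases h : PySem.List.pyGetD l (k - 1) 0 = PySem.List.pyGetD l k 0 - 1
    · rw [List.filter_cons_of_neg (by simp; omega)]
      simp only [List.foldl_cons, aStep, if_pos h]
      exact ih (k + 1) (by omega) (by omega) ranges start
    · rw [List.filter_cons_of_pos (by simp; omega)]
      simp only [List.foldl_cons, aStep, if_neg h, List.cons_append, tailA]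
      rw [ih (k + 1) (by omega) (by omega)
        (ranges ++ [(start, PySem.List.pyGetD l (k - 1) 0 + 2)]) (PySem.List.pyGetD l k 0)]
      rw [chainB_eq_tailA]
      simp

-- ===== VERDICT (by name: the statement is the Claim_ definition above) =====
theorem collapse_pos_py_spec : Claim_equal_collapse_pos_py := by
  intro positions _ hpre
  unfold Spec_collapse_pos_py
  cases positions with
  | nil => exact absurd rfl hpre
  | cons p rest =>
    set l := p :: rest with hl
    have hne : l ≠ [] := by simp [hl]
    unfold collapse_pos_py collapse_pos_py_alt
    have hget : PySem.List.pyGet? l 0 = some p := by simp [hl]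
    rw [hget]
    simp only []
    rw [pyGetD_last l hne]
    have hmain := fold_eq l rest.length 1 (by omega) (by simp [hl]; omega) [] p
    rw [hmain]
    have hzip := zip_map_chainB l
        ((((PySem.List.pyRange 1 (l.length : Int) 1).filter
            (fun i => PySem.List.pyGetD l i 0 != PySem.List.pyGetD l (i - 1) 0 + 1)) ++ [(l.length : Int)])) 0
    simp only [List.drop_one, List.tail_cons] at hzip ⊢
    rw [hzip, chainB_eq_tailA]
    simp [hl, PySem.List.pyGetD_zero_cons]
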